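-- pv_equiv track=rewrite | github.com/massstab/advent_of_code_2023 | python/day_12_a.py | check_arrangement
-- ===== SOURCE A (Python) =====
-- def check_arrangement(arr, rule):
--     rule_checkt = []
--     len_group = 0  # size of contiguous group of damaged springs
--     group_number = 0  # the nth group in the row
--     damaged_spring = False  # checks if we are on a damaged spring
--     inside_group = False
--     for i, char in enumerate(arr):
--         if char == '#':
--             damaged_spring = True
--             inside_group = True
--             len_group += 1
--         else:
--             damaged_spring = False
--             inside_group = False
--         if not inside_group and len_group > 0:
--             group_number += 1
--             rule_checkt.append(len_group)
--             len_group = 0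
--         if i == len(arr) - 1 and inside_group:
--             rule_checkt.append(len_group)
--     return rule_checkt == rule
-- ===== SOURCE B (Python) =====
-- def check_arrangement(arr, rule):
--     # Scan run-by-run with two indices instead of a per-character state machine.
--     groups = []
--     i = 0
--     n = len(arr)
--     while i < n:
--         if arr[i] != '#':
--             i += 1
--         else:
--             j = i + 1
--             while j < n and arr[j] == '#':
--                 j += 1
--             groups.append(j - i)
--             i = j
--     return groups == rule
-- ===== Notes on version B (the rewrite author's own statement) =====
-- stated objective: simpler
-- what changed: Replaced A's per-character state machine (len_group/inside_group/damaged_spring flags plus a special last-index check) by a two-index scan that walks run by run: on each '#' it advances an inner index to the end of the run and appends the run length, so no flags and no end-of-string special case are needed.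
import Mathlib
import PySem

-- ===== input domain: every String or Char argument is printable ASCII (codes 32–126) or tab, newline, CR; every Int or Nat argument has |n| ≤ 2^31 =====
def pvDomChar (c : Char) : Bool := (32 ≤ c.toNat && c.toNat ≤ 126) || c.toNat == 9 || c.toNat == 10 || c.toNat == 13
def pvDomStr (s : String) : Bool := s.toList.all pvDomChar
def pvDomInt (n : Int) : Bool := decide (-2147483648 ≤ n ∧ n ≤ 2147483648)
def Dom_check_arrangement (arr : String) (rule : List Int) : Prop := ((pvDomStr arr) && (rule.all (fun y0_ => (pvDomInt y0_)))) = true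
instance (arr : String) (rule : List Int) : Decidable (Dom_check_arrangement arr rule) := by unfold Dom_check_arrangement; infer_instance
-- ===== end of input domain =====

-- B replaces A's per-character state machine (flags + last-index check) by a two-index
-- run-by-run scan; objective: simpler/idiomatic, same O(n) cost.

-- ===== PORT A =====
-- loop body of A's for-loop (state = (rule_checkt, len_group, group_number, damaged_spring, inside_group))
def pvStepA (n : Int) (s : List Int × Int × Int × Bool × Bool) (p : Int × Char) :
    List Int × Int × Int × Bool × Bool :=
  let rc := s.1; let lg := s.2.1; let gn := s.2.2.1
  let i := p.1; let ch := p.2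
  let (lg, ds, ig) := if ch = '#' then (lg + 1, true, true) else (lg, false, false)
  let (rc, gn, lg) := if ¬ ig = true ∧ lg > 0 then (rc ++ [lg], gn + 1, (0 : Int)) else (rc, gn, lg)
  let rc := if i = n - 1 ∧ ig = true then rc ++ [lg] else rc
  (rc, lg, gn, ds, ig)

def check_arrangement (arr : String) (rule : List Int) : Bool :=
  let cs := arr.toList
  let st := (PySem.List.enumerate cs).foldl (pvStepA (cs.length : Int)) ([], 0, 0, false, false)
  st.1 == rule

-- ===== PORT B =====
-- inner while: advance j over the '#' run (arr[j] read with a default, guarded by j < n)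
def pvInnerB (cs : List Char) (n j : Nat) : Nat :=
  if h : j < n ∧ cs.getD j ' ' = '#' then pvInnerB cs n (j + 1) else j
termination_by n - j
decreasing_by omega

-- needed by pvOuterB's termination proof
theorem le_pvInnerB (cs : List Char) (n j : Nat) : j ≤ pvInnerB cs n j := by
  fun_induction pvInnerB with
  | case1 j h ih => omega
  | case2 j _h => omega

-- outer while over i; on a '#' append the run length j - i and jump to j
def pvOuterB (cs : List Char) (n i : Nat) (groups : List Int) : List Int :=
  if h : i < n then
    if cs.getD i ' ' ≠ '#' then pvOuterB cs n (i + 1) groups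
    else
      let j := pvInnerB cs n (i + 1)
      pvOuterB cs n j (groups ++ [(j : Int) - (i : Int)])
  else groups
termination_by n - i
decreasing_by
  · omega
  · have := le_pvInnerB cs n (i + 1); omega

def check_arrangement_alt (arr : String) (rule : List Int) : Bool :=
  let cs := arr.toList
  pvOuterB cs cs.length 0 [] == rule

-- ===== PRECONDITION & SPEC =====
def Spec_check_arrangement (arr : String) (rule : List Int) (out : Bool) : Prop := out = check_arrangement_alt arr rule
instance (arr : String) (rule : List Int) (out : Bool) : Decidable (Spec_check_arrangement arr rule out) := by unfold Spec_check_arrangement; infer_instance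

-- ===== CLAIM (what is proved, stated in full; the proofs are below) =====
def Claim_equal_check_arrangement : Prop := ∀ (arr : String) (rule : List Int), Dom_check_arrangement arr rule → Spec_check_arrangement arr rule (check_arrangement arr rule)

-- ===== LEMMAS AND PROOFS =====

-- runs of '#' in cs, given an open run of length lg carried in (characterises A's loop)
def runsAux (lg : Int) : List Char → List Int
  | [] => if lg > 0 then [lg] else []
  | c :: t => if c = '#' then runsAux (lg + 1) t else (if lg > 0 then [lg] else []) ++ runsAux 0 t

-- run lengths computed takeWhile/dropWhile-style (characterises B's loop)
def runs0 : List Char → List Int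
  | [] => []
  | c :: t =>
    if c = '#' then (1 + ((t.takeWhile (· = '#')).length : Int)) :: runs0 (t.dropWhile (· = '#'))
    else runs0 t
termination_by cs => cs.length
decreasing_by
  · have := List.length_dropWhile_le (· = '#') t; simp; omega
  · simp

theorem loopA (cs : List Char) (n : Int) : ∀ (k : Int) (rc : List Int) (lg gn : Int) (ds ig : Bool),
    0 ≤ lg → (cs = [] → lg = 0) → k + cs.length = n →
    ((PySem.List.enumerate cs k).foldl (pvStepA n) (rc, lg, gn, ds, ig)).1 = rc ++ runsAux lg cs := by
  induction cs with
  | nil =>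
    intro k rc lg gn ds ig h0 he hn
    simp [runsAux, PySem.List.enumerate, he rfl]
  | cons c t ih =>
    intro k rc lg gn ds ig h0 he hn
    rw [PySem.List.enumerate_cons, List.foldl_cons]
    by_cases hc : c = '#'
    · subst hc
      have hstep : pvStepA n (rc, lg, gn, ds, ig) (k, '#')
          = (if k = n - 1 then rc ++ [lg + 1] else rc, lg + 1, gn, true, true) := by
        simp [pvStepA]
      rw [hstep]
      cases t with
      | nil =>
        have hk : k = n - 1 := by simp at hn; omega
        have hp : lg + 1 > 0 := by omega
        simp [PySem.List.enumerate, runsAux, hk, hp]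
      | cons d u =>
        have hk : ¬ k = n - 1 := by simp at hn ⊢; omega
        rw [if_neg hk]
        rw [ih (k + 1) rc (lg + 1) gn true true (by omega) (by simp) (by simp at hn ⊢; omega)]
        conv_rhs => rw [runsAux]
        simp
    · have hlg : lg > 0 ∨ lg = 0 := by omega
      have hstep : pvStepA n (rc, lg, gn, ds, ig) (k, c)
          = (rc ++ (if lg > 0 then [lg] else []), 0, if lg > 0 then gn + 1 else gn, false, false) := by
        rcases hlg with h | h
        · simp [pvStepA, hc, h]
        · subst h; simp [pvStepA, hc]
      rw [hstep]
      rw [ih (k + 1) _ 0 _ false false le_rfl (fun _ => rfl) (by simp at hn ⊢; omega)]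
      conv_rhs => rw [runsAux]
      simp [hc, List.append_assoc]

theorem innerB_eq (cs : List Char) (n j : Nat) (hn : n = cs.length) :
    pvInnerB cs n j = j + ((cs.drop j).takeWhile (· = '#')).length := by
  fun_induction pvInnerB with
  | case1 j h ih =>
    obtain ⟨hj, hch⟩ := h
    rw [ih]
    rw [List.drop_eq_getElem_cons (show j < cs.length by omega)]
    have hx : cs[j] = '#' := by rwa [List.getD_eq_getElem cs ' ' (by omega)] at hch
    simp [hx]
    try omega
  | case2 j h =>
    by_cases hj : j < cs.length
    · have hch : ¬ cs.getD j ' ' = '#' := fun hc => h ⟨by omega, hc⟩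
      rw [List.drop_eq_getElem_cons hj]
      have hx : ¬ cs[j] = '#' := by rwa [List.getD_eq_getElem cs ' ' hj] at hch
      simp [hx]
    · rw [List.drop_eq_nil_of_le (by omega)]; simp

theorem pvDropTakeWhile (p : Char → Bool) (l : List Char) :
    l.drop ((l.takeWhile p).length) = l.dropWhile p := by
  induction l with
  | nil => simp
  | cons c t ih => by_cases hp : p c <;> simp [hp, ih]

theorem outerB_eq (cs : List Char) (n : Nat) (hn : n = cs.length) :
    ∀ (i : Nat) (groups : List Int), pvOuterB cs n i groups = groups ++ runs0 (cs.drop i) := by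
  intro i groups
  fun_induction pvOuterB with
  | case1 i groups h hc ih =>
    rw [ih]
    rw [List.drop_eq_getElem_cons (show i < cs.length by omega)]
    have hx : ¬ cs[i] = '#' := by rwa [List.getD_eq_getElem cs ' ' (by omega)] at hc
    conv_rhs => rw [runs0]
    simp [hx]
  | case2 i groups h hc jv ih =>
    simp only [ne_eq, not_not] at hc
    rw [ih]
    have hi : i < cs.length := by omega
    have hgi : cs[i] = '#' := by rwa [List.getD_eq_getElem cs ' ' hi] at hc
    have hj : jv = (i + 1) + ((cs.drop (i + 1)).takeWhile (· = '#')).length :=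
      innerB_eq cs n (i + 1) hn
    have hd : cs.drop jv = (cs.drop (i + 1)).dropWhile (· = '#') := by
      rw [← pvDropTakeWhile (· = '#') (cs.drop (i + 1)), List.drop_drop, hj]
    have hRHS : runs0 (cs.drop i)
        = (1 + (((cs.drop (i + 1)).takeWhile (· = '#')).length : Int))
            :: runs0 ((cs.drop (i + 1)).dropWhile (· = '#')) := by
      rw [List.drop_eq_getElem_cons hi, hgi]
      conv_lhs => rw [runs0]
      simp
    rw [hd, hRHS, hj, List.append_assoc]
    congr 1
    rw [List.singleton_append]
    congr 1
    push_cast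
    ring
  | case3 i groups h =>
    rw [List.drop_eq_nil_of_le (by omega)]
    simp [runs0]

theorem runsAux_pos (t : List Char) : ∀ (lg : Int), 0 < lg →
    runsAux lg t = (lg + ((t.takeWhile (· = '#')).length : Int)) :: runsAux 0 (t.dropWhile (· = '#')) := by
  induction t with
  | nil => intro lg h; simp [runsAux, h]
  | cons c t ih =>
    intro lg h
    by_cases hc : c = '#'
    · subst hc
      rw [runsAux, if_pos rfl, ih (lg + 1) (by omega)]
      simp
      omega
    · simp [runsAux, hc, h]

theorem runsAux_eq_runs0 : ∀ (N : Nat) (cs : List Char), cs.length ≤ N → runsAux 0 cs = runs0 cs := by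
  intro N
  induction N with
  | zero =>
    intro cs h
    have hcs : cs = [] := List.eq_nil_of_length_eq_zero (by omega)
    subst hcs
    simp [runsAux, runs0]
  | succ N ih =>
    intro cs h
    match cs with
    | [] => simp [runsAux, runs0]
    | c :: t =>
      by_cases hc : c = '#'
      · subst hc
        rw [runsAux, if_pos rfl, zero_add, runsAux_pos t 1 one_pos,
            ih (t.dropWhile (· = '#'))
              (by have := List.length_dropWhile_le (· = '#') t; simp at h; omega)]
        conv_rhs => rw [runs0]
        simp
      · conv_rhs => rw [runs0]
        rw [if_neg hc]
        rw [runsAux, if_neg hc]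
        simp [ih t (by simp at h; omega)]

-- ===== VERDICT (by name: the statement is the Claim_ definition above) =====
theorem check_arrangement_spec : Claim_equal_check_arrangement := by
  intro arr rule _
  unfold Spec_check_arrangement
  simp only [check_arrangement, check_arrangement_alt]
  rw [loopA arr.toList (arr.toList.length : Int) 0 [] 0 0 false false le_rfl (fun _ => rfl) (by simp),
      outerB_eq arr.toList arr.toList.length rfl 0 [],
      runsAux_eq_runs0 arr.toList.length arr.toList le_rfl]
  simp
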